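-- pv_equiv track=rewrite | github.com/yaojiejia/buildathon26 | backend/agents/patch_agent.py | _is_secret_path
-- ===== SOURCE A (Python) =====
-- def _is_secret_path(path: str) -> bool:
--     p = path.lower()
--     blocked = [
--         ".env",
--         "secret",
--         "secrets",
--         "credential",
--         "credentials",
--         "token",
--         "private_key",
--         "id_rsa",
--     ]
--     return any(part in p for part in blocked)
-- ===== SOURCE B (Python) =====
-- # Single left-to-right scan: at each position test a startswith against a
-- # deduplicated pattern tuple ("secrets"/"credentials" are subsumed by
-- # "secret"/"credential"), instead of eight independent substring searches.
-- _BLOCKED = (".env", "secret", "credential", "token", "private_key", "id_rsa")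
--
--
-- def _is_secret_path(path: str) -> bool:
--     p = path.lower()
--     return any(p.startswith(_BLOCKED, i) for i in range(len(p)))
-- ===== Notes on version B (the rewrite author's own statement) =====
-- stated objective: alternative
-- what changed: B makes one scan over the lowercased path, testing at each position whether any of six deduplicated patterns starts there, instead of A's eight separate full substring searches.
import Mathlib
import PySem

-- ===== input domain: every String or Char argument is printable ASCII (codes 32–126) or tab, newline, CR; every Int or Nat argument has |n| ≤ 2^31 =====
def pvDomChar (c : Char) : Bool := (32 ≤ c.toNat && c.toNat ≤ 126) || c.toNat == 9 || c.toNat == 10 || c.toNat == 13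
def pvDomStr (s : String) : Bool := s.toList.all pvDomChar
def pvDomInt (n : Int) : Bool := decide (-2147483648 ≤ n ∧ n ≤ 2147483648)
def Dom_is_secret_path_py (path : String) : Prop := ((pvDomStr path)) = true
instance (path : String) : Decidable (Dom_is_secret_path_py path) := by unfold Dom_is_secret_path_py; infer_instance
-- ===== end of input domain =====

-- B makes one scan over the lowercased path (startswith at each index against a
-- deduplicated pattern list) instead of A's eight independent substring searches.

-- ===== PORT A =====
def is_secret_path_py (path : String) : Bool :=
  let p := PySem.Str.lower path
  [".env", "secret", "secrets", "credential", "credentials", "token",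
   "private_key", "id_rsa"].any (fun part => PySem.Str.isIn part p)

-- ===== PORT B =====
def pvBlocked : List String := [".env", "secret", "credential", "token", "private_key", "id_rsa"]

-- the loop 'any(p.startswith(_BLOCKED, i) for i in range(len(p)))': recursion over suffixes of p
def pvScan (s : List Char) : Bool :=
  match s with
  | [] => false
  | _ :: t => pvBlocked.any (fun b => PySem.Chars.startswith s b.toList) || pvScan t

def is_secret_path_py_alt (path : String) : Bool :=
  pvScan (PySem.Str.lower path).toList

-- ===== PRECONDITION & SPEC =====
def Spec_is_secret_path_py (path : String) (out : Bool) : Prop := out = is_secret_path_py_alt path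
instance (path : String) (out : Bool) : Decidable (Spec_is_secret_path_py path out) := by unfold Spec_is_secret_path_py; infer_instance

-- ===== CLAIM (what is proved, stated in full; the proofs are below) =====
def Claim_equal_is_secret_path_py : Prop := ∀ (path : String), Dom_is_secret_path_py path → Spec_is_secret_path_py path (is_secret_path_py path)

-- ===== LEMMAS AND PROOFS =====

lemma pvScan_iff (s : List Char) :
    pvScan s = true ↔ ∃ b ∈ pvBlocked, b.toList <:+: s := by
  induction s with
  | nil => simp [pvScan]; decide
  | cons c t ih =>
      simp only [pvScan, Bool.or_eq_true, List.any_eq_true, PySem.Chars.startswith_iff, ih,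
        List.infix_cons_iff]
      constructor
      · rintro (⟨b, hb, h⟩ | ⟨b, hb, h⟩)
        · exact ⟨b, hb, Or.inl h⟩
        · exact ⟨b, hb, Or.inr h⟩
      · rintro ⟨b, hb, h | h⟩
        · exact Or.inl ⟨b, hb, h⟩
        · exact Or.inr ⟨b, hb, h⟩

lemma pv_secret_pref : "secret".toList <+: "secrets".toList := by decide

lemma pv_credential_pref : "credential".toList <+: "credentials".toList := by decide

theorem pv_eq (path : String) : is_secret_path_py path = is_secret_path_py_alt path := by
  rw [Bool.eq_iff_iff]
  simp only [is_secret_path_py, is_secret_path_py_alt, pvScan_iff, List.any_eq_true,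
    PySem.Str.isIn_iff_infix, pvBlocked]
  constructor
  · rintro ⟨b, hb, h⟩
    fin_cases hb
    · exact ⟨".env", by simp, h⟩
    · exact ⟨"secret", by simp, h⟩
    · exact ⟨"secret", by simp, pv_secret_pref.isInfix.trans h⟩
    · exact ⟨"credential", by simp, h⟩
    · exact ⟨"credential", by simp, pv_credential_pref.isInfix.trans h⟩
    · exact ⟨"token", by simp, h⟩
    · exact ⟨"private_key", by simp, h⟩
    · exact ⟨"id_rsa", by simp, h⟩
  · rintro ⟨b, hb, h⟩
    fin_cases hb
    · exact ⟨".env", by simp, h⟩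
    · exact ⟨"secret", by simp, h⟩
    · exact ⟨"credential", by simp, h⟩
    · exact ⟨"token", by simp, h⟩
    · exact ⟨"private_key", by simp, h⟩
    · exact ⟨"id_rsa", by simp, h⟩

-- ===== VERDICT (by name: the statement is the Claim_ definition above) =====
theorem is_secret_path_py_spec : Claim_equal_is_secret_path_py := by
  intro path _
  exact pv_eq path
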